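-- pv_equiv track=rewrite | github.com/timsergor/StillPython | 373.py | alphabetBoardPath
-- ===== SOURCE A (Python) =====
-- def alphabetBoardPath(target: str) -> str:
--     char = {}
--     for i in range(26):
--         char[chr(ord("a") + i)] = (i // 5, i % 5)
--     pre = []
--
--     def path(a,b):
--         if char[a][0] == char[b][0]:
--             if char[a][1] < char[b][1]:
--                 for i in range(char[b][1] - char[a][1]):
--                     pre.append("R")
--             else:
--                 for i in range(char[a][1] - char[b][1]):
--                     pre.append("L")
--         elif char[a][0] > char[b][0]:
--             for i in range(char[a][0] - char[b][0]):
--                 pre.append("U")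
--             if char[a][1] < char[b][1]:
--                 for i in range(char[b][1] - char[a][1]):
--                     pre.append("R")
--             else:
--                 for i in range(char[a][1] - char[b][1]):
--                     pre.append("L")
--         else:
--             if char[a][1] < char[b][1]:
--                 for i in range(char[b][1] - char[a][1]):
--                     pre.append("R")
--             else:
--                 for i in range(char[a][1] - char[b][1]):
--                     pre.append("L")
--             for i in range(char[b][0] - char[a][0]):
--                 pre.append("D")
--         pre.append("!")
--
--     path("a", target[0])
--     for i in range(len(target) - 1):
--         path(target[i], target[i + 1])
--     return "".join(pre)
-- ===== SOURCE B (Python) =====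
-- def alphabetBoardPath(target: str) -> str:
--     char = {chr(ord("a") + i): (i // 5, i % 5) for i in range(26)}
--
--     def walk(r, c, tr, tc):
--         if (r, c) == (tr, tc):
--             return "!"
--         if tr < r:
--             return "U" + walk(r - 1, c, tr, tc)
--         if tc < c:
--             return "L" + walk(r, c - 1, tr, tc)
--         if tc > c:
--             return "R" + walk(r, c + 1, tr, tc)
--         return "D" + walk(r + 1, c, tr, tc)
--
--     out = ""
--     r, c = char["a"]
--     for ch in target:
--         tr, tc = char[ch]
--         out += walk(r, c, tr, tc)
--         r, c = tr, tc
--     return out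
-- ===== Notes on version B (the rewrite author's own statement) =====
-- stated objective: alternative
-- what changed: A precomputes row/column deltas and, in nested three-way directional branches, runs counted range-loops appending repeated move letters; B never computes move counts: a recursive helper walks the grid one cell at a time, re-deciding the direction (U, then L, then R, then D) at every step until the cursor reaches the target cell, and the outer loop threads the cursor through the string.
import Mathlib
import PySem

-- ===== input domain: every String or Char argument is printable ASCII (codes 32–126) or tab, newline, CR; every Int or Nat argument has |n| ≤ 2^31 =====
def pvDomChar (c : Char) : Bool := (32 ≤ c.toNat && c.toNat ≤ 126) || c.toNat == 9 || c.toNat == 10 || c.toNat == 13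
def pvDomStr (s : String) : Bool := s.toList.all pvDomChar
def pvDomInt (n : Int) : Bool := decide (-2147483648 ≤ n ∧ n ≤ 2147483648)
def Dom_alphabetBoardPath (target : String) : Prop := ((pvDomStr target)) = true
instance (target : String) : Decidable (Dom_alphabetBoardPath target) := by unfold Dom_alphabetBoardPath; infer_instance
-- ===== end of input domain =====

-- B replaces A's count-and-repeat emission (nested directional branches running counted append
-- loops) by a recursive one-cell-at-a-time walk that re-decides the direction at every step.

-- ===== PORT A =====
-- char = {} ; for i in range(26): char[chr(ord('a')+i)] = (i//5, i%5)
def pvCharDictA : PySem.Dict Char (Int × Int) :=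
  (PySem.List.pyRange 0 26 1).foldl
    (fun d i => d.insert (Char.ofNat ('a'.toNat + i.toNat)) (PySem.Int.floordiv i 5, PySem.Int.mod i 5))
    PySem.Dict.empty

-- the inner 'def path(a,b)' appending single-character strings to 'pre'; 'pre' is kept as a
-- List Char since every appended string is one character and the result is "".join(pre).
-- Dict lookup char[a] is via getD: Python raises KeyError on a missing key (excluded by Pre_).
def pvPathA (pre : List Char) (a b : Char) : List Char :=
  let pa := pvCharDictA.getD a (0, 0)
  let pb := pvCharDictA.getD b (0, 0)
  let pre :=
    if pa.1 = pb.1 then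
      if pa.2 < pb.2 then (PySem.List.pyRange 0 (pb.2 - pa.2) 1).foldl (fun p _ => p ++ ['R']) pre
      else (PySem.List.pyRange 0 (pa.2 - pb.2) 1).foldl (fun p _ => p ++ ['L']) pre
    else if pa.1 > pb.1 then
      let pre := (PySem.List.pyRange 0 (pa.1 - pb.1) 1).foldl (fun p _ => p ++ ['U']) pre
      if pa.2 < pb.2 then (PySem.List.pyRange 0 (pb.2 - pa.2) 1).foldl (fun p _ => p ++ ['R']) pre
      else (PySem.List.pyRange 0 (pa.2 - pb.2) 1).foldl (fun p _ => p ++ ['L']) pre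
    else
      let pre :=
        if pa.2 < pb.2 then (PySem.List.pyRange 0 (pb.2 - pa.2) 1).foldl (fun p _ => p ++ ['R']) pre
        else (PySem.List.pyRange 0 (pa.2 - pb.2) 1).foldl (fun p _ => p ++ ['L']) pre
      (PySem.List.pyRange 0 (pb.1 - pa.1) 1).foldl (fun p _ => p ++ ['D']) pre
  pre ++ ['!']

def alphabetBoardPath (target : String) : String :=
  match PySem.Str.pyGet? target 0 with
  | none => ""   -- Python raises IndexError at target[0] here (outside Pre_)
  | some c0 =>
    let cs := target.toList
    let pre := pvPathA [] 'a' c0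
    let pre := (PySem.List.pyRange 0 (PySem.Str.len target - 1) 1).foldl
      (fun p i => pvPathA p (PySem.List.pyGetD cs i 'a') (PySem.List.pyGetD cs (i + 1) 'a')) pre
    String.ofList pre

-- ===== PORT B =====
-- char = {chr(ord('a')+i): (i//5, i%5) for i in range(26)}
def pvCharDictB : PySem.Dict Char (Int × Int) :=
  PySem.Dict.ofList ((PySem.List.pyRange 0 26 1).map
    (fun i => (Char.ofNat ('a'.toNat + i.toNat), (PySem.Int.floordiv i 5, PySem.Int.mod i 5))))

-- Source B's recursive 'walk': one grid cell per step, direction re-decided each call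
def pvWalk (r c tr tc : Int) : List Char :=
  if (r, c) = (tr, tc) then ['!']
  else if tr < r then 'U' :: pvWalk (r - 1) c tr tc
  else if tc < c then 'L' :: pvWalk r (c - 1) tr tc
  else if tc > c then 'R' :: pvWalk r (c + 1) tr tc
  else 'D' :: pvWalk (r + 1) c tr tc
termination_by ((r - tr).natAbs + (c - tc).natAbs)
decreasing_by all_goals (simp_all [Prod.ext_iff]; omega)

def alphabetBoardPath_alt (target : String) : String :=
  let res := target.toList.foldl
    (fun (st : (Int × Int) × List Char) ch =>
      let q := pvCharDictB.getD ch (0, 0)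
      (q, st.2 ++ pvWalk st.1.1 st.1.2 q.1 q.2))
    (pvCharDictB.getD 'a' (0, 0), [])
  String.ofList res.2

-- ===== PRECONDITION & SPEC =====
-- Pre_ excludes exactly where the Python A raises: IndexError on the empty string,
-- KeyError on any character that is not a lowercase ASCII letter.
def Pre_alphabetBoardPath (target : String) : Prop :=
  target.toList ≠ [] ∧ (target.toList.all fun c => decide ('a' ≤ c) && decide (c ≤ 'z')) = true
instance (target : String) : Decidable (Pre_alphabetBoardPath target) := by
  unfold Pre_alphabetBoardPath; infer_instance
def pvWitness_alphabetBoardPath : String := "leet"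

def Spec_alphabetBoardPath (target : String) (out : String) : Prop := out = alphabetBoardPath_alt target
instance (target : String) (out : String) : Decidable (Spec_alphabetBoardPath target out) := by unfold Spec_alphabetBoardPath; infer_instance

-- ===== CLAIM (what is proved, stated in full; the proofs are below) =====
def Claim_equal_alphabetBoardPath : Prop := ∀ (target : String), Dom_alphabetBoardPath target → Pre_alphabetBoardPath target → Spec_alphabetBoardPath target (alphabetBoardPath target)

-- ===== LEMMAS AND PROOFS =====

-- the two dict builds produce the same dictionary
theorem pvDict_eq : pvCharDictB = pvCharDictA := by decide

-- position of a character, as both ports look it up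
def pvPos (c : Char) : Int × Int := pvCharDictA.getD c (0, 0)

-- the segment a walk emits, in count form
def pvSeg (p q : Int × Int) : List Char :=
  List.replicate (p.1 - q.1).toNat 'U' ++ List.replicate (p.2 - q.2).toNat 'L' ++
  List.replicate (q.2 - p.2).toNat 'R' ++ List.replicate (q.1 - p.1).toNat 'D' ++ ['!']

-- the step walk emits exactly the count-form segment
theorem pvWalk_eq (r c tr tc : Int) : pvWalk r c tr tc = pvSeg (r, c) (tr, tc) := by
  fun_induction pvWalk r c tr tc with
  | case1 r c h =>
    simp only [Prod.mk.injEq] at h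
    simp [pvSeg, h.1, h.2, Int.toNat_eq_zero.mpr (by omega : (tr - tr : Int) ≤ 0),
      Int.toNat_eq_zero.mpr (by omega : (tc - tc : Int) ≤ 0)]
  | case2 r c h h1 ih =>
    have e1 : (r - tr).toNat = (r - 1 - tr).toNat + 1 := by omega
    simp [pvSeg, ih, e1, List.replicate_succ,
      Int.toNat_eq_zero.mpr (by omega : (tr - r : Int) ≤ 0),
      Int.toNat_eq_zero.mpr (by omega : (tr - (r - 1) : Int) ≤ 0)]
  | case3 r c h h1 h2 ih =>
    have e1 : (c - tc).toNat = (c - 1 - tc).toNat + 1 := by omega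
    simp [pvSeg, ih, e1, List.replicate_succ,
      Int.toNat_eq_zero.mpr (by omega : (r - tr : Int) ≤ 0),
      Int.toNat_eq_zero.mpr (by omega : (tc - c : Int) ≤ 0),
      Int.toNat_eq_zero.mpr (by omega : (tc - (c - 1) : Int) ≤ 0)]
  | case4 r c h h1 h2 h3 ih =>
    have e1 : (tc - c).toNat = (tc - (c + 1)).toNat + 1 := by omega
    simp [pvSeg, ih, e1, List.replicate_succ,
      Int.toNat_eq_zero.mpr (by omega : (r - tr : Int) ≤ 0),
      Int.toNat_eq_zero.mpr (by omega : (c - tc : Int) ≤ 0),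
      Int.toNat_eq_zero.mpr (by omega : (c + 1 - tc : Int) ≤ 0)]
  | case5 r c h h1 h2 h3 ih =>
    have hc : c = tc := by omega
    have hr : r < tr := by
      rcases lt_or_ge r tr with h' | h'
      · exact h'
      · have hrt : r = tr := by omega
        exact absurd (by rw [hrt, hc]) h
    have e1 : (tr - r).toNat = (tr - (r + 1)).toNat + 1 := by omega
    rw [hc] at ih
    simp [pvSeg, ih, hc, e1, List.replicate_succ,
      Int.toNat_eq_zero.mpr (by omega : (r - tr : Int) ≤ 0),
      Int.toNat_eq_zero.mpr (by omega : (r + 1 - tr : Int) ≤ 0),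
      Int.toNat_eq_zero.mpr (by omega : (tc - tc : Int) ≤ 0)]

-- B's segments for the consecutive pairs, starting from position p
def pvChain (p : Int × Int) : List Char → List (List Char)
  | [] => []
  | c :: t => pvSeg p (pvPos c) :: pvChain (pvPos c) t

theorem pvRepFold (c : Char) (n : Int) (pre : List Char) :
    (PySem.List.pyRange 0 n 1).foldl (fun p _ => p ++ [c]) pre = pre ++ List.replicate n.toNat c := by
  rw [PySem.List.foldl_append_singleton_eq_map (fun _ : Int => c) (PySem.List.pyRange 0 n 1) pre]
  congr 1
  rw [show (fun _ : Int => c) = Function.const Int c from rfl, List.map_const,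
    PySem.List.length_pyRange_one]
  norm_num

theorem pvRepTo0 (c : Char) (n : Int) (h : n ≤ 0) : List.replicate n.toNat c = [] := by
  simp [Int.toNat_eq_zero.mpr h]

-- one path(a,b) call of A emits exactly the count-form segment for the pair of positions
theorem pvPathA_eq (pre : List Char) (a b : Char) :
    pvPathA pre a b = pre ++ pvSeg (pvPos a) (pvPos b) := by
  unfold pvPathA pvSeg pvPos
  simp only [pvRepFold]
  rcases h1 : pvCharDictA.getD a (0,0) with ⟨r1, c1⟩
  rcases h2 : pvCharDictA.getD b (0,0) with ⟨r2, c2⟩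
  simp only
  split_ifs with hr hcol hgt hcol2 hcol3
  · simp [pvRepTo0 'U' (r1 - r2) (by omega), pvRepTo0 'L' (c1 - c2) (by omega),
      pvRepTo0 'D' (r2 - r1) (by omega)]
  · simp [pvRepTo0 'U' (r1 - r2) (by omega), pvRepTo0 'R' (c2 - c1) (by omega),
      pvRepTo0 'D' (r2 - r1) (by omega)]
  · simp [pvRepTo0 'L' (c1 - c2) (by omega), pvRepTo0 'D' (r2 - r1) (by omega)]
  · simp [pvRepTo0 'R' (c2 - c1) (by omega), pvRepTo0 'D' (r2 - r1) (by omega)]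
  · simp [pvRepTo0 'U' (r1 - r2) (by omega), pvRepTo0 'L' (c1 - c2) (by omega)]
  · simp [pvRepTo0 'U' (r1 - r2) (by omega), pvRepTo0 'R' (c2 - c1) (by omega)]

-- B's fold, characterised
theorem pvFoldB (l : List Char) (p : Int × Int) (out : List Char) :
    l.foldl (fun (st : (Int × Int) × List Char) ch =>
        let q := pvCharDictB.getD ch (0, 0)
        (q, st.2 ++ pvWalk st.1.1 st.1.2 q.1 q.2)) (p, out)
      = (l.foldl (fun _ c => pvPos c) p, out ++ (pvChain p l).flatten) := by
  induction l generalizing p out with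
  | nil => simp [pvChain]
  | cons c t ih =>
    simp only [List.foldl_cons]
    rw [ih]
    simp [pvChain, pvDict_eq, pvPos, pvWalk_eq]

-- the index loop visits exactly the consecutive pairs (Nat-index form)
theorem pvPairsNat (c0 : Char) (rest : List Char) :
    (List.range rest.length).flatMap
      (fun k => pvSeg (pvPos ((c0 :: rest).getD k 'a')) (pvPos ((c0 :: rest).getD (k + 1) 'a')))
    = (pvChain (pvPos c0) rest).flatten := by
  induction rest generalizing c0 with
  | nil => simp [pvChain]
  | cons c1 t ih =>
    simp only [List.length_cons, List.range_succ_eq_map, List.flatMap_cons, List.flatMap_map]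
    simp only [List.getD_cons_succ, List.getD_cons_zero, pvChain, List.flatten_cons]
    have ih' := ih c1
    simp only [List.getD_cons_succ] at ih'
    rw [ih']

-- A's index loop over consecutive pairs, characterised
theorem pvFoldA (c0 : Char) (rest : List Char) (pre : List Char) :
    (PySem.List.pyRange 0 ((((c0 :: rest).length : Int)) - 1) 1).foldl
      (fun p i => pvPathA p (PySem.List.pyGetD (c0 :: rest) i 'a')
                            (PySem.List.pyGetD (c0 :: rest) (i + 1) 'a')) pre
    = pre ++ (pvChain (pvPos c0) rest).flatten := by
  have hlen : (((c0 :: rest).length : Int)) - 1 = (rest.length : Int) := by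
    simp [List.length_cons]
  rw [hlen]
  simp only [pvPathA_eq]
  rw [PySem.List.foldl_append_eq_flatMap]
  congr 1
  rw [PySem.List.pyRange_zero_nat, List.flatMap_map]
  rw [← pvPairsNat c0 rest]
  simp only [← Nat.cast_add_one, PySem.List.pyGetD_natCast]

-- ===== VERDICT (by name: the statement is the Claim_ definition above) =====
theorem alphabetBoardPath_spec : Claim_equal_alphabetBoardPath := by
  intro target _ _
  unfold Spec_alphabetBoardPath alphabetBoardPath alphabetBoardPath_alt
  have hget : PySem.Str.pyGet? target 0 = target.toList[0]? := by
    simpa using PySem.Str.pyGet?_natCast target 0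
  rcases h : target.toList with _ | ⟨c0, rest⟩
  · rw [h] at hget
    simp only [hget]
    rfl
  · rw [h] at hget
    simp only [hget, List.getElem?_cons_zero, h, PySem.Str.len_eq]
    rw [pvFoldB]
    have hinit : pvCharDictB.getD 'a' (0, 0) = pvPos 'a' := by rw [pvDict_eq]; rfl
    rw [hinit]
    have hA := pvFoldA c0 rest (pvPathA [] 'a' c0)
    rw [← h] at hA ⊢
    rw [show ((target.toList.length : Int)) = (((c0 :: rest).length : Int)) by rw [h]] at hA ⊢
    rw [hA, pvPathA_eq, h]
    simp [pvChain]
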